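-- pv_equiv track=rewrite | github.com/Sonnysboy/ConsoleYahtzee | gen.py | die_face
-- ===== SOURCE A (Python) =====
-- def die_face(faces_count, roll, eyes='o '):
--     """Return the full face of the roll for a faces_count-sided die."""
--
--     # Build a proper die pattern according to faces_count
--     if faces_count > 12:
--         limit, pattern = 20, '---------\n|{} {} {} {}|\n|{} {} {} {}|\n|{} {}'
--
--     elif faces_count > 6:
--         limit, pattern = 12, ' ------- \n|{} {} {} {}|\n|{} {}'
--
--     else:
--         limit, pattern = 6, '+-----+\n| {} {} |\n| {}'
--
--     # Fill the pattern with correct eye for current roll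
--     upper_die = pattern.format(*(eyes[roll<i] for i in range(1, limit, 2)))
--
--     # Return mirrored pattern string with changing middle to get a full face
--     return upper_die + eyes[roll&1] + upper_die[::-1]
-- ===== SOURCE B (Python) =====
-- def die_face(faces_count, roll, eyes='o '):
--     """Return the full face of the roll for a faces_count-sided die."""
--     e = lambda i: eyes[roll < i]   # pip at threshold i
--     c = eyes[roll & 1]             # centre pip
--     # Build the complete face line by line (no mirror trick), then join.
--     if faces_count > 12:
--         rows = ['---------',
--                 '|%s %s %s %s|' % (e(1), e(3), e(5), e(7)),
--                 '|%s %s %s %s|' % (e(9), e(11), e(13), e(15)),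
--                 '|%s %s%s%s %s|' % (e(17), e(19), c, e(19), e(17)),
--                 '|%s %s %s %s|' % (e(15), e(13), e(11), e(9)),
--                 '|%s %s %s %s|' % (e(7), e(5), e(3), e(1)),
--                 '---------']
--     elif faces_count > 6:
--         rows = [' ------- ',
--                 '|%s %s %s %s|' % (e(1), e(3), e(5), e(7)),
--                 '|%s %s%s%s %s|' % (e(9), e(11), c, e(11), e(9)),
--                 '|%s %s %s %s|' % (e(7), e(5), e(3), e(1)),
--                 ' ------- ']
--     else:
--         rows = ['+-----+',
--                 '| %s %s |' % (e(1), e(3)),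
--                 '| %s%s%s |' % (e(5), c, e(5)),
--                 '| %s %s |' % (e(3), e(1)),
--                 '+-----+']
--     return '\n'.join(rows)
-- ===== Notes on version B (the rewrite author's own statement) =====
-- stated objective: alternative
-- what changed: B drops A's mirror trick (format the upper half, then append the centre pip and the character-reversed upper half): it computes each pip once and lays out the complete face as an explicit list of lines in reading order, joined with newlines.
import Mathlib
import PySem

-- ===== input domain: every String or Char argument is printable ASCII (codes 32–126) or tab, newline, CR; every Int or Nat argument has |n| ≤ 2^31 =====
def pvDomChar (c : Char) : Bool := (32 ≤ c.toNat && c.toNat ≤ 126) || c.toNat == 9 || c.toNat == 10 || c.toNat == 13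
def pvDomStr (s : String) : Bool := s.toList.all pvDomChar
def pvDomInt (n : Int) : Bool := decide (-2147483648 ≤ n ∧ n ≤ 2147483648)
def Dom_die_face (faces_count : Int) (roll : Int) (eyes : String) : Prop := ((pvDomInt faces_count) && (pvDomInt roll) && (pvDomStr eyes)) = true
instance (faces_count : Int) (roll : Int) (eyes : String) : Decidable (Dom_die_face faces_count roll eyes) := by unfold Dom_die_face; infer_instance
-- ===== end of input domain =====

-- B replaces A's mirror trick (build upper half, append centre + reversed half) by an explicit
-- list of full-face lines in reading order joined with newlines; same output, objective: alternative.

-- str.format with '{}' placeholders: each '{}' is replaced by the next argument (here always a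
-- single char, and the argument count always matches the placeholder count).
def pvFormat : List Char → List Char → List Char
  | [], _ => []
  | '{' :: '}' :: rest, a :: args => a :: pvFormat rest args
  | c :: rest, args => c :: pvFormat rest args

-- eyes[b] for a bool index b (False=0, True=1); default ' ' is never reached under Pre_die_face
def pvEye (eyes : String) (b : Bool) : Char :=
  (PySem.Str.pyGet? eyes (if b then 1 else 0)).getD ' '

-- ===== PORT A =====
def die_face (faces_count : Int) (roll : Int) (eyes : String) : String :=
  let lp : Int × String :=
    if faces_count > 12 then
      (20, "---------\n|{} {} {} {}|\n|{} {} {} {}|\n|{} {}")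
    else if faces_count > 6 then
      (12, " ------- \n|{} {} {} {}|\n|{} {}")
    else
      (6, "+-----+\n| {} {} |\n| {}")
  let upper : List Char :=
    pvFormat lp.2.toList ((PySem.List.pyRange 1 lp.1 2).map (fun i => pvEye eyes (roll < i)))
  -- roll & 1: PySem.Int.band is Python-exact on negatives
  String.ofList (upper ++ [(PySem.Str.pyGet? eyes (PySem.Int.band roll 1)).getD ' '] ++ upper.reverse)

-- ===== PORT B =====
def die_face_alt (faces_count : Int) (roll : Int) (eyes : String) : String :=
  let e : Int → Char := fun i => (PySem.Str.pyGet? eyes (if roll < i then 1 else 0)).getD ' '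
  let c : Char := (PySem.Str.pyGet? eyes (PySem.Int.band roll 1)).getD ' '
  let rows : List (List Char) :=
    if faces_count > 12 then
      [ "---------".toList,
        ['|', e 1, ' ', e 3, ' ', e 5, ' ', e 7, '|'],
        ['|', e 9, ' ', e 11, ' ', e 13, ' ', e 15, '|'],
        ['|', e 17, ' ', e 19, c, e 19, ' ', e 17, '|'],
        ['|', e 15, ' ', e 13, ' ', e 11, ' ', e 9, '|'],
        ['|', e 7, ' ', e 5, ' ', e 3, ' ', e 1, '|'],
        "---------".toList ]
    else if faces_count > 6 then
      [ " ------- ".toList,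
        ['|', e 1, ' ', e 3, ' ', e 5, ' ', e 7, '|'],
        ['|', e 9, ' ', e 11, c, e 11, ' ', e 9, '|'],
        ['|', e 7, ' ', e 5, ' ', e 3, ' ', e 1, '|'],
        " ------- ".toList ]
    else
      [ "+-----+".toList,
        ['|', ' ', e 1, ' ', e 3, ' ', '|'],
        ['|', ' ', e 5, c, e 5, ' ', '|'],
        ['|', ' ', e 3, ' ', e 1, ' ', '|'],
        "+-----+".toList ]
  String.ofList (List.intercalate ['\n'] rows)

-- ===== PRECONDITION & SPEC =====
-- Pre_ is exactly where Python A returns: eyes needs 2 chars unless only index 0 is ever used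
-- (roll at/above the largest pip threshold and even), where 1 char suffices; eyes = '' always raises.
def Pre_die_face (faces_count : Int) (roll : Int) (eyes : String) : Prop :=
  let limit : Int := if faces_count > 12 then 20 else if faces_count > 6 then 12 else 6
  if limit - 1 ≤ roll ∧ roll % 2 = 0 then 1 ≤ eyes.toList.length else 2 ≤ eyes.toList.length
instance (faces_count : Int) (roll : Int) (eyes : String) : Decidable (Pre_die_face faces_count roll eyes) := by
  unfold Pre_die_face; infer_instance
def pvWitness_die_face : Int × Int × String := (6, 3, "o ")

def Spec_die_face (faces_count : Int) (roll : Int) (eyes : String) (out : String) : Prop := out = die_face_alt faces_count roll eyes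
instance (faces_count : Int) (roll : Int) (eyes : String) (out : String) : Decidable (Spec_die_face faces_count roll eyes out) := by unfold Spec_die_face; infer_instance

-- ===== CLAIM =====
def Claim_equal_die_face : Prop := ∀ (faces_count : Int) (roll : Int) (eyes : String), Dom_die_face faces_count roll eyes → Pre_die_face faces_count roll eyes → Spec_die_face faces_count roll eyes (die_face faces_count roll eyes)

-- ===== LEMMAS AND PROOFS =====

-- ===== VERDICT =====
theorem die_face_spec : Claim_equal_die_face := by
  intro fc roll eyes _ _
  show die_face fc roll eyes = die_face_alt fc roll eyes
  unfold die_face die_face_alt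
  split_ifs <;>
    simp [PySem.List.pyRange, List.range_succ, pvFormat, pvEye, List.intercalate,
      List.intersperse]
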